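-- pv_equiv track=rewrite | github.com/borgnetzwerk/speaker-mining | speakermining/src/process/mention_detection/publications.py | _publication_section
-- ===== SOURCE A (Python) =====
-- def _publication_section(text: str) -> str:
-- 	if "Publikation" not in text:
-- 		return ""
--
-- 	tail = text.split("Publikation", 1)[1]
-- 	end_markers = ["Archivnummer", "Sendetitel", "FolgenNr"]
-- 	end_positions = [tail.find(marker) for marker in end_markers if tail.find(marker) >= 0]
-- 	if end_positions:
-- 		tail = tail[: min(end_positions)]
-- 	return tail.strip()
-- ===== SOURCE B (Python) =====
-- def _publication_section(text: str) -> str: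
--     if "Publikation" not in text:
--         return ""
--     tail = text.split("Publikation", 1)[1]
--     markers = ("Archivnummer", "Sendetitel", "FolgenNr")
--     # single left-to-right scan: truncate at the first position where any marker starts
--     for i in range(len(tail)):
--         if tail.startswith(markers, i):
--             return tail[:i].strip()
--     return tail.strip()
-- ===== Notes on version B (the rewrite author's own statement) =====
-- stated objective: alternative
-- what changed: Instead of computing each of the three end markers' find() positions and truncating at their minimum, B makes a single left-to-right scan of the tail and truncates at the first position where any marker starts (str.startswith with a marker tuple).
import Mathlib
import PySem

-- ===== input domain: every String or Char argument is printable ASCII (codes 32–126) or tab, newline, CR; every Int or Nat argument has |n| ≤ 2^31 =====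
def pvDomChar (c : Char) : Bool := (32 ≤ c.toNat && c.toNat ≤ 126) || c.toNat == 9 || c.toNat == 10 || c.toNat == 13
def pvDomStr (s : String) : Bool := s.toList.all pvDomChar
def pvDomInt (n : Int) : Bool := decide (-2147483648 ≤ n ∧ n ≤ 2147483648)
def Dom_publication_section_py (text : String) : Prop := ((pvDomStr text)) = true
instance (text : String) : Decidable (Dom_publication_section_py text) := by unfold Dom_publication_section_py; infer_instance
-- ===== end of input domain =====

-- B replaces the three per-marker `find` scans plus `min` by a single left-to-right scan of
-- the tail that stops at the first position where any end marker starts (objective: alternative).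

-- ===== PORT A =====
def pubEndMarkers : List String := ["Archivnummer", "Sendetitel", "FolgenNr"]

def publication_section_py (text : String) : String :=
  if PySem.Str.isIn "Publikation" text = false then ""
  else
    -- '"Publikation" in text' holds here, so the split has a part [1]; the getD defaults are unreachable
    let tail := ((PySem.Str.splitMax? text "Publikation" 1).getD []).getD 1 ""
    let end_positions : List Int :=
      (pubEndMarkers.filter (fun m => decide (0 ≤ PySem.Str.find tail m))).map
        (fun m => PySem.Str.find tail m)
    match end_positions with
    | [] => PySem.Str.strip tail
    | p :: rest => PySem.Str.strip (PySem.Str.slice tail none (some (rest.foldl min p)))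

-- ===== PORT B =====
def pubMarkersChars : List (List Char) :=
  ["Archivnummer".toList, "Sendetitel".toList, "FolgenNr".toList]

-- the 'for i in range(len(tail)): if tail.startswith(markers, i): return tail[:i]…' loop,
-- as structural recursion over the suffixes of the tail
def pubCut (ms : List (List Char)) : List Char → List Char
  | [] => []
  | c :: rest =>
      if ms.any (fun m => m.isPrefixOf (c :: rest)) then []
      else c :: pubCut ms rest

def publication_section_py_alt (text : String) : String :=
  if PySem.Str.isIn "Publikation" text = false then ""
  else
    let tail := ((PySem.Str.splitMax? text "Publikation" 1).getD []).getD 1 ""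
    PySem.Str.strip (String.ofList (pubCut pubMarkersChars tail.toList))

-- ===== PRECONDITION & SPEC =====
def Spec_publication_section_py (text : String) (out : String) : Prop := out = publication_section_py_alt text
instance (text : String) (out : String) : Decidable (Spec_publication_section_py text out) := by unfold Spec_publication_section_py; infer_instance

-- ===== CLAIM (what is proved, stated in full; the proofs are below) =====
def Claim_equal_publication_section_py : Prop := ∀ (text : String), Dom_publication_section_py text → Spec_publication_section_py text (publication_section_py text)

-- ===== LEMMAS AND PROOFS =====

-- the per-tail positions list computed by A, moved to List Char
def pubPositions (ms : List (List Char)) (cs : List Char) : List Int :=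
  (ms.filter (fun m => decide (0 ≤ PySem.Chars.find cs m))).map (fun m => PySem.Chars.find cs m)

lemma pub_find_nil {m : List Char} (hm : m ≠ []) : PySem.Chars.find [] m = -1 := by
  rw [PySem.Chars.find_eq_neg_one_iff]
  intro h
  exact hm (List.eq_nil_of_infix_nil h)

lemma pub_find_cons (c : Char) (rest m : List Char) (_hm : m ≠ []) :
    PySem.Chars.find (c :: rest) m =
      if m <+: (c :: rest) then 0
      else if PySem.Chars.find rest m = -1 then -1
      else PySem.Chars.find rest m + 1 := by
  by_cases hpre : m <+: (c :: rest)
  · simp only [hpre, if_true]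
    have hne : PySem.Chars.find (c :: rest) m ≠ -1 := by
      rw [Ne, PySem.Chars.find_eq_neg_one_iff, not_not]
      exact hpre.isInfix
    have h0 : 0 ≤ PySem.Chars.find (c :: rest) m := by
      have := PySem.Chars.neg_one_le_find (c :: rest) m; omega
    obtain ⟨h1, h2⟩ := PySem.Chars.find_spec h0
    by_contra hne0
    have hpos : 0 < (PySem.Chars.find (c :: rest) m).toNat := by omega
    exact h2 0 hpos (by simpa using hpre)
  · simp only [hpre, if_false]
    by_cases hrest : PySem.Chars.find rest m = -1
    · simp only [hrest, if_true]
      rw [PySem.Chars.find_eq_neg_one_iff]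
      intro hinf
      obtain ⟨j, hj⟩ := ((PySem.Chars.exists_prefix_drop_iff_isIn m (c :: rest)).trans
        (PySem.Chars.isIn_iff_infix m (c :: rest))).mpr hinf
      cases j with
      | zero => exact hpre (by simpa using hj)
      | succ j' =>
          rw [List.drop_succ_cons] at hj
          have : m <:+: rest := ((PySem.Chars.exists_prefix_drop_iff_isIn m rest).trans
            (PySem.Chars.isIn_iff_infix m rest)).mp ⟨j', hj⟩
          exact (PySem.Chars.find_eq_neg_one_iff rest m).mp hrest this
    · simp only [hrest, if_false]
      have hk0 : 0 ≤ PySem.Chars.find rest m := by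
        have := PySem.Chars.neg_one_le_find rest m; omega
      obtain ⟨hk1, hk2⟩ := PySem.Chars.find_spec hk0
      have hdrop : m <+: List.drop ((PySem.Chars.find rest m).toNat + 1) (c :: rest) := by
        simpa [List.drop_succ_cons] using hk1
      have hne : PySem.Chars.find (c :: rest) m ≠ -1 := by
        rw [Ne, PySem.Chars.find_eq_neg_one_iff, not_not]
        exact ((PySem.Chars.exists_prefix_drop_iff_isIn m (c :: rest)).trans
          (PySem.Chars.isIn_iff_infix m (c :: rest))).mp ⟨_, hdrop⟩
      have h0 : 0 ≤ PySem.Chars.find (c :: rest) m := by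
        have := PySem.Chars.neg_one_le_find (c :: rest) m; omega
      obtain ⟨h1, h2⟩ := PySem.Chars.find_spec h0
      have hj0 : (PySem.Chars.find (c :: rest) m).toNat ≠ 0 := by
        intro h
        exact hpre (by simpa [h] using h1)
      have hle1 : (PySem.Chars.find (c :: rest) m).toNat ≤ (PySem.Chars.find rest m).toNat + 1 := by
        by_contra h
        exact h2 _ (by omega) hdrop
      have hdropj : m <+: List.drop ((PySem.Chars.find (c :: rest) m).toNat - 1) rest := by
        obtain ⟨j', hj'⟩ := Nat.exists_eq_succ_of_ne_zero hj0
        rw [hj'] at h1 ⊢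
        simpa [List.drop_succ_cons] using h1
      have hle2 : (PySem.Chars.find rest m).toNat ≤ (PySem.Chars.find (c :: rest) m).toNat - 1 := by
        by_contra h
        exact hk2 _ (by omega) hdropj
      omega

lemma pub_foldl_min_le_init (l : List Int) (p : Int) : l.foldl min p ≤ p := by
  induction l generalizing p with
  | nil => simp
  | cons a t ih => exact le_trans (ih (min p a)) (min_le_left _ _)

lemma pub_foldl_min_le (l : List Int) (p x : Int) (hx : x ∈ l) : l.foldl min p ≤ x := by
  induction l generalizing p with
  | nil => cases hx
  | cons a t ih =>
      rcases List.mem_cons.mp hx with rfl | h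
      · exact le_trans (pub_foldl_min_le_init t (min p x)) (min_le_right _ _)
      · exact ih (min p a) h

lemma pub_le_foldl_min (l : List Int) (p a : Int) (hp : a ≤ p) (hl : ∀ x ∈ l, a ≤ x) :
    a ≤ l.foldl min p := by
  induction l generalizing p with
  | nil => simpa
  | cons b t ih =>
      exact ih (min p b) (le_min hp (hl b (by simp))) (fun x hx => hl x (by simp [hx]))

lemma pub_foldl_min_map_add_one (l : List Int) (p : Int) :
    (l.map (· + 1)).foldl min (p + 1) = l.foldl min p + 1 := by
  induction l generalizing p with
  | nil => simp
  | cons a t ih => simpa [min_add_add_right] using ih (min p a)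

lemma pub_positions_nonneg (ms : List (List Char)) (cs : List Char) :
    ∀ q ∈ pubPositions ms cs, 0 ≤ q := by
  intro q hq
  simp only [pubPositions, List.mem_map, List.mem_filter, decide_eq_true_eq] at hq
  obtain ⟨m, ⟨-, h⟩, rfl⟩ := hq
  exact h

lemma pub_main (ms : List (List Char)) (hms : ∀ m ∈ ms, m ≠ []) (cs : List Char) :
    (match pubPositions ms cs with
     | [] => cs
     | p :: rest => List.take (rest.foldl min p).toNat cs) = pubCut ms cs := by
  induction cs with
  | nil =>
      have : pubPositions ms [] = [] := by
        simp only [pubPositions, List.map_eq_nil_iff, List.filter_eq_nil_iff]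
        intro m hm
        simp [pub_find_nil (hms m hm)]
      simp [this, pubCut]
  | cons c rest ih =>
      by_cases hP : ms.any (fun m => m.isPrefixOf (c :: rest)) = true
      · -- some marker starts at position 0
        obtain ⟨m0, hm0, hm0p⟩ := List.any_eq_true.mp hP
        have hm0pre : m0 <+: (c :: rest) := List.isPrefixOf_iff_prefix.mp hm0p
        have hfind0 : PySem.Chars.find (c :: rest) m0 = 0 := by
          rw [pub_find_cons c rest m0 (hms m0 hm0)]
          simp [hm0pre]
        have h0mem : (0 : Int) ∈ pubPositions ms (c :: rest) := by
          simp only [pubPositions, List.mem_map, List.mem_filter, decide_eq_true_eq]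
          exact ⟨m0, ⟨hm0, by simp [hfind0]⟩, hfind0⟩
        rcases hpos : pubPositions ms (c :: rest) with _ | ⟨p, r⟩
        · rw [hpos] at h0mem; cases h0mem
        · rw [hpos] at h0mem
          have hnn := pub_positions_nonneg ms (c :: rest)
          rw [hpos] at hnn
          have hle : r.foldl min p ≤ 0 := by
            rcases List.mem_cons.mp h0mem with h | h
            · simpa [← h] using pub_foldl_min_le_init r p
            · exact pub_foldl_min_le r p 0 h
          have hge : 0 ≤ r.foldl min p :=
            pub_le_foldl_min r p 0 (hnn p (by simp)) (fun x hx => hnn x (by simp [hx]))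
          have : (r.foldl min p).toNat = 0 := by omega
          simp [this, pubCut, hP]
      · -- no marker starts here: positions shift by one
        have hnopre : ∀ m ∈ ms, ¬ m <+: (c :: rest) := by
          intro m hm hp
          exact hP (List.any_eq_true.mpr ⟨m, hm, List.isPrefixOf_iff_prefix.mpr hp⟩)
        have hshift : ∀ l : List (List Char), (∀ m ∈ l, m ≠ []) →
            (∀ m ∈ l, ¬ m <+: (c :: rest)) →
            pubPositions l (c :: rest) = (pubPositions l rest).map (· + 1) := by
          intro l
          induction l with
          | nil => intro _ _; rfl
          | cons m l' ihl =>
              intro h1 h2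
              have hfc : PySem.Chars.find (c :: rest) m =
                  (if PySem.Chars.find rest m = -1 then -1
                   else PySem.Chars.find rest m + 1) := by
                rw [pub_find_cons c rest m (h1 m (by simp)), if_neg (h2 m (by simp))]
              have hge := PySem.Chars.neg_one_le_find rest m
              have htail := ihl (fun x hx => h1 x (by simp [hx]))
                (fun x hx => h2 x (by simp [hx]))
              by_cases h : PySem.Chars.find rest m = -1
              · simp only [pubPositions, List.filter_cons] at htail ⊢
                simp [hfc, h, htail]
              · have hge0 : 0 ≤ PySem.Chars.find rest m := by omega
                have hge1 : 0 ≤ PySem.Chars.find rest m + 1 := by omega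
                simp only [pubPositions, List.filter_cons] at htail ⊢
                simp [hfc, h, hge0, hge1, htail]
        have hshift' := hshift ms hms hnopre
        rcases hpos : pubPositions ms rest with _ | ⟨p, r⟩
        · rw [hshift', hpos]
          rw [hpos] at ih
          simp only [List.map_nil]
          simp only at ih
          simp [pubCut, hP, ← ih]
        · rw [hshift', hpos]
          rw [hpos] at ih
          have hnn := pub_positions_nonneg ms rest
          rw [hpos] at hnn
          have hge : 0 ≤ r.foldl min p :=
            pub_le_foldl_min r p 0 (hnn p (by simp)) (fun x hx => hnn x (by simp [hx]))
          simp only [List.map_cons]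
          rw [pub_foldl_min_map_add_one]
          have htn : (r.foldl min p + 1).toNat = (r.foldl min p).toNat + 1 := by omega
          rw [htn, List.take_succ_cons]
          simp only at ih
          simp [pubCut, hP, ← ih]

lemma pub_positions_str (t : String) :
    (pubEndMarkers.filter (fun m => decide (0 ≤ PySem.Str.find t m))).map
        (fun m => PySem.Str.find t m)
      = pubPositions pubMarkersChars t.toList := by
  by_cases h1 : 0 ≤ PySem.Chars.find t.toList "Archivnummer".toList <;>
  by_cases h2 : 0 ≤ PySem.Chars.find t.toList "Sendetitel".toList <;>
  by_cases h3 : 0 ≤ PySem.Chars.find t.toList "FolgenNr".toList <;>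
  simp_all [pubEndMarkers, pubMarkersChars, pubPositions, PySem.Str.find_eq]

-- ===== VERDICT (by name: the statement is the Claim_ definition above) =====
theorem publication_section_py_spec : Claim_equal_publication_section_py := by
  intro text _
  unfold Spec_publication_section_py publication_section_py publication_section_py_alt
  by_cases hg : PySem.Str.isIn "Publikation" text = false
  · rw [if_pos hg, if_pos hg]
  · rw [if_neg hg, if_neg hg]
    set t := ((PySem.Str.splitMax? text "Publikation" 1).getD []).getD 1 "" with ht
    have hms : ∀ m ∈ pubMarkersChars, m ≠ [] := by decide
    have hmain := pub_main pubMarkersChars hms t.toList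
    dsimp only
    rw [pub_positions_str t]
    rcases hpos : pubPositions pubMarkersChars t.toList with _ | ⟨p, r⟩
    · rw [hpos] at hmain
      simp only at hmain
      rw [← hmain, String.ofList_toList]
    · rw [hpos] at hmain
      simp only at hmain
      have hnn := pub_positions_nonneg pubMarkersChars t.toList
      rw [hpos] at hnn
      have hge : 0 ≤ r.foldl min p :=
        pub_le_foldl_min r p 0 (hnn p (by simp)) (fun x hx => hnn x (by simp [hx]))
      apply String.toList_inj.mp
      have hinner : (PySem.Str.slice t none (some (r.foldl min p))).toList
          = (String.ofList (pubCut pubMarkersChars t.toList)).toList := by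
        rw [PySem.Str.toList_slice, PySem.Chars.slice_eq_listSlice, PySem.List.slice_to _ hge,
          String.toList_ofList, hmain]
      rw [PySem.Str.toList_strip, PySem.Str.toList_strip, hinner]
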